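-- pv_equiv track=rewrite | github.com/DanielOlivo/DI_BOOTCAMP_WEB148 | Week1/Day5/ExerciseXP/challenge1.py | custom_split
-- ===== SOURCE A (Python) =====
-- def custom_split(message, s = ' '):
--     result = []
--     current = ''
--     for c in message:
--         if len(current) == 0 and c == s:
--             continue
--         elif len(current) > 0 and c == s:
--             result.append(current)
--             current = ''
--         else:
--             current += c
--     # check the end
--     if len(current) > 0:
--         result.append(current)
--     return result
-- ===== SOURCE B (Python) =====
-- def custom_split(message, s=' '):
--     # Two-pointer run scanner: skip separator chars, slice out each maximal
--     # run of non-separator chars, instead of building chunks char by char.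
--     res = []
--     i, n = 0, len(message)
--     while i < n:
--         if message[i] == s:
--             i += 1
--         else:
--             j = i
--             while j < n and message[j] != s:
--                 j += 1
--             res.append(message[i:j])
--             i = j
--     return res
-- ===== Notes on version B (the rewrite author's own statement) =====
-- stated objective: alternative
-- what changed: Replaced A's char-by-char accumulator state machine with a two-pointer scanner that skips separator chars and slices out each maximal non-separator run directly.
import Mathlib
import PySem

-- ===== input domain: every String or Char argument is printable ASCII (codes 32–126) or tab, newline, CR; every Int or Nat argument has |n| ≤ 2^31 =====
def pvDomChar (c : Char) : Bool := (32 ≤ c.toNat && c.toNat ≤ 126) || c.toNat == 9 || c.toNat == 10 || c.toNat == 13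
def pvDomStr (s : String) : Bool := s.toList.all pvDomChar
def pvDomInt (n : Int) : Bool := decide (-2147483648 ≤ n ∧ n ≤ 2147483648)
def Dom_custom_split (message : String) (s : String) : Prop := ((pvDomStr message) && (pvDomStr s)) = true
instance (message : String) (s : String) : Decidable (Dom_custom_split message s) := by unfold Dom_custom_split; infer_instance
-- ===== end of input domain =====

-- B is an alternative two-pointer run-slicing scanner proved to return the same chunks as A's char-accumulator state machine.

-- ===== PORT A =====
-- Python's `c == s` compares a one-character string with s.
def pvIsSep (s : String) (c : Char) : Bool := s.toList == [c]

-- one iteration of A's for-loop over state (result, current)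
def pvStepA (s : String) (st : List String × List Char) (c : Char) : List String × List Char :=
  if st.2.length = 0 ∧ pvIsSep s c then st
  else if st.2.length > 0 ∧ pvIsSep s c then (st.1 ++ [String.ofList st.2], [])
  else (st.1, st.2 ++ [c])

def custom_split (message : String) (s : String) : List String :=
  let st := message.toList.foldl (pvStepA s) ([], [])
  if st.2.length > 0 then st.1 ++ [String.ofList st.2] else st.1

-- ===== PORT B =====
-- inner while of B: advance j past the maximal run of non-separator chars
def pvFind (s : String) (cs : List Char) (j : Nat) : Nat :=
  if h : j < cs.length then
    if pvIsSep s cs[j] then j else pvFind s cs (j + 1)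
  else j
termination_by cs.length - j

theorem pvFind_ge (s : String) (cs : List Char) (j : Nat) : j ≤ pvFind s cs j := by
  rw [pvFind]
  split
  · split
    · exact le_refl _
    · have := pvFind_ge s cs (j + 1)
      omega
  · exact le_refl _
termination_by cs.length - j

theorem pvFind_gt (s : String) (cs : List Char) (j : Nat) (h : j < cs.length)
    (hns : ¬ pvIsSep s cs[j] = true) : j < pvFind s cs j := by
  rw [pvFind, dif_pos h, if_neg hns]
  have := pvFind_ge s cs (j + 1)
  omega

-- outer while of B
def pvLoop (s : String) (cs : List Char) (i : Nat) (res : List String) : List String :=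
  if h : i < cs.length then
    if pvIsSep s cs[i] then pvLoop s cs (i + 1) res
    else
      pvLoop s cs (pvFind s cs i)
        (res ++ [String.ofList ((cs.drop i).take (pvFind s cs i - i))])
  else res
termination_by cs.length - i
decreasing_by
  · omega
  · have := pvFind_gt s cs i h (by assumption)
    omega

def custom_split_alt (message : String) (s : String) : List String :=
  pvLoop s message.toList 0 []

-- ===== PRECONDITION & SPEC =====
def Spec_custom_split (message : String) (s : String) (out : List String) : Prop := out = custom_split_alt message s
instance (message : String) (s : String) (out : List String) : Decidable (Spec_custom_split message s out) := by unfold Spec_custom_split; infer_instance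

-- ===== CLAIM (what is proved, stated in full; the proofs are below) =====
def Claim_equal_custom_split : Prop := ∀ (message : String) (s : String), Dom_custom_split message s → Spec_custom_split message s (custom_split message s)

-- ===== LEMMAS AND PROOFS =====

theorem pvFind_le (s : String) (cs : List Char) (j : Nat) (h : j ≤ cs.length) :
    pvFind s cs j ≤ cs.length := by
  rw [pvFind]
  split
  · split
    · omega
    · exact pvFind_le s cs (j + 1) (by omega)
  · exact h
termination_by cs.length - j

theorem pvFind_nonsep (s : String) (cs : List Char) (j : Nat) :
    ∀ k (hk : k < cs.length), j ≤ k → k < pvFind s cs j → ¬ pvIsSep s cs[k] = true := by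
  intro k hk hjk hkf
  rw [pvFind] at hkf
  by_cases h : j < cs.length
  · rw [dif_pos h] at hkf
    by_cases hsep : pvIsSep s cs[j] = true
    · rw [if_pos hsep] at hkf; omega
    · rw [if_neg hsep] at hkf
      rcases Nat.eq_or_lt_of_le hjk with rfl | hlt
      · exact hsep
      · exact pvFind_nonsep s cs (j + 1) k hk (by omega) hkf
  · rw [dif_neg h] at hkf
    omega
termination_by cs.length - j

theorem pvFind_stop (s : String) (cs : List Char) (j : Nat) :
    ∀ (h : pvFind s cs j < cs.length), pvIsSep s cs[pvFind s cs j] = true := by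
  intro h
  by_cases hj : j < cs.length
  · by_cases hsep : pvIsSep s cs[j] = true
    · have he : pvFind s cs j = j := by rw [pvFind, dif_pos hj, if_pos hsep]
      simp only [he] at h ⊢
      exact hsep
    · have he : pvFind s cs j = pvFind s cs (j + 1) := by
        rw [pvFind, dif_pos hj, if_neg hsep]
      simp only [he] at h ⊢
      exact pvFind_stop s cs (j + 1) h
  · have he : pvFind s cs j = j := by rw [pvFind, dif_neg hj]
    simp only [he] at h
    omega
termination_by cs.length - j

-- A's finishing step after the loop
def pvFinish (st : List String × List Char) : List String :=
  if st.2.length > 0 then st.1 ++ [String.ofList st.2] else st.1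

-- folding A's step over a run of non-separator chars just appends the run to current
theorem run_fold (s : String) (cs : List Char) :
    ∀ m i j res cur, j - i = m → i ≤ j → j ≤ cs.length →
    (∀ k (hk : k < cs.length), i ≤ k → k < j → ¬ pvIsSep s cs[k] = true) →
    List.foldl (pvStepA s) (res, cur) (cs.drop i)
      = List.foldl (pvStepA s) (res, cur ++ (cs.drop i).take (j - i)) (cs.drop j) := by
  intro m
  induction m with
  | zero =>
    intro i j res cur hm hij hj hns
    have : i = j := by omega
    subst this
    simp
  | succ m ih =>
    intro i j res cur hm hij hj hns
    have hi : i < cs.length := by omega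
    have hdrop : cs.drop i = cs[i] :: cs.drop (i + 1) := by
      rw [List.drop_eq_getElem_cons hi]
    have hns_i : ¬ pvIsSep s cs[i] = true := hns i hi (le_refl _) (by omega)
    rw [hdrop, List.foldl_cons]
    have hstep : pvStepA s (res, cur) cs[i] = (res, cur ++ [cs[i]]) := by
      simp [pvStepA, hns_i]
    rw [hstep]
    rw [ih (i + 1) j res (cur ++ [cs[i]]) (by omega) (by omega) hj
      (fun k hk h1 h2 => hns k hk (by omega) h2)]
    congr 2
    have hji : j - i = (j - (i + 1)) + 1 := by omega
    rw [hji, List.take_succ_cons]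
    simp

-- main invariant: A's fold from state (res, '') at position i agrees with B's loop from i
theorem main_inv (s : String) (cs : List Char) :
    ∀ m i res, cs.length - i = m →
    pvFinish (List.foldl (pvStepA s) (res, []) (cs.drop i)) = pvLoop s cs i res := by
  intro m
  induction m using Nat.strong_induction_on with
  | _ m ih =>
    intro i res hm
    by_cases hi : i < cs.length
    · have hdrop : cs.drop i = cs[i] :: cs.drop (i + 1) := by
        rw [List.drop_eq_getElem_cons hi]
      by_cases hsep : pvIsSep s cs[i] = true
      · -- separator at i: both sides skip it
        rw [pvLoop, dif_pos hi, if_pos hsep]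
        rw [hdrop, List.foldl_cons]
        have : pvStepA s (res, []) cs[i] = (res, []) := by simp [pvStepA, hsep]
        rw [this]
        exact ih (cs.length - (i + 1)) (by omega) (i + 1) res rfl
      · -- run from i up to pvFind s cs i
        have hij : i < pvFind s cs i := pvFind_gt s cs i hi hsep
        have hjle : pvFind s cs i ≤ cs.length := pvFind_le s cs i (by omega)
        have hrun := run_fold s cs (pvFind s cs i - i) i (pvFind s cs i) res [] rfl
          (by omega) hjle (fun k hk h1 h2 => pvFind_nonsep s cs i k hk h1 h2)
        simp only [List.nil_append] at hrun
        rw [pvLoop, dif_pos hi, if_neg hsep, hrun]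
        have hrunlen : ((cs.drop i).take (pvFind s cs i - i)).length = pvFind s cs i - i := by
          rw [List.length_take, List.length_drop]; omega
        by_cases hjn : pvFind s cs i < cs.length
        · -- stopped at a separator: A flushes current; B's loop skips it at the next step
          have hsepj := pvFind_stop s cs i hjn
          have hdropj : cs.drop (pvFind s cs i) = cs[pvFind s cs i] :: cs.drop (pvFind s cs i + 1) := by
            rw [List.drop_eq_getElem_cons hjn]
          rw [hdropj, List.foldl_cons]
          have hstep : pvStepA s (res, (cs.drop i).take (pvFind s cs i - i)) cs[pvFind s cs i]
              = (res ++ [String.ofList ((cs.drop i).take (pvFind s cs i - i))], []) := by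
            simp only [pvStepA]
            rw [if_neg (by rintro ⟨h1, -⟩; rw [hrunlen] at h1; omega),
              if_pos ⟨by rw [hrunlen]; omega, hsepj⟩]
          rw [hstep]
          rw [ih (cs.length - (pvFind s cs i + 1)) (by omega) (pvFind s cs i + 1) _ rfl]
          conv_rhs => rw [pvLoop]
          rw [dif_pos hjn, if_pos hsepj]
        · -- stopped at the end of the string: A's final flush appends the run; B's loop stops
          have hjeq : pvFind s cs i = cs.length := by omega
          rw [hjeq, List.drop_length, List.foldl_nil]
          conv_rhs => rw [pvLoop]
          rw [dif_neg (by omega)]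
          simp only [pvFinish]
          rw [if_pos (by simp only [List.length_take, List.length_drop]; omega)]
    · rw [List.drop_eq_nil_of_le (by omega), List.foldl_nil]
      rw [pvLoop, dif_neg hi]
      simp [pvFinish]

-- ===== VERDICT (by name: the statement is the Claim_ definition above) =====
theorem custom_split_spec : Claim_equal_custom_split := by
  intro message s _
  unfold Spec_custom_split custom_split custom_split_alt
  have := main_inv s message.toList (message.toList.length - 0) 0 [] rfl
  simpa [pvFinish] using this
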